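-- pv_equiv track=rewrite | github.com/MusicComputingDurham/MuProcDurham | examples/Practical_Tonnetz_Generation.py | to_melody
-- ===== SOURCE A (Python) =====
-- def to_melody(seq, offset=60, min_pitch=58, max_pitch=72):
--     # vvvvvvvvvvvvvvvvvvvvvvvvvvvvvvvvvvvvvvvvvvvvvvvv
--     melody = []
--     for p in seq:
--         p += offset
--         if melody:
--             p_ = melody[-1]
--             while p - p_ > 7:
--                 p -= 12
--             while p - p_ < -6:
--                 p += 12
--             if p > max_pitch:
--                 p -= 12
--             if p < min_pitch:
--                 p += 12
--         melody.append(p)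
--     # ^^^^^^^^^^^^^^^^^^^^^^^^^^^^^^^^^^^^^^^^^^^^^^^^
--     return melody
-- ===== SOURCE B (Python) =====
-- def to_melody(seq, offset=60, min_pitch=58, max_pitch=72):
--     melody = []
--     for x in seq:
--         p = x + offset
--         if melody:
--             p_ = melody[-1]
--             d = p - p_
--             if d > 7:
--                 d -= 12 * ((d + 4) // 12)
--             elif d < -6:
--                 d += 12 * ((5 - d) // 12)
--             p = p_ + d
--             if p > max_pitch:
--                 p -= 12
--             if p < min_pitch:
--                 p += 12
--         melody.append(p)
--     return melody
-- ===== Notes on version B (the rewrite author's own statement) =====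
-- stated objective: faster
-- what changed: The two while loops that shift the pitch by +/-12 one step at a time are replaced by closed-form ceiling-division arithmetic computing the whole shift at once, O(1) per element.
import Mathlib
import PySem

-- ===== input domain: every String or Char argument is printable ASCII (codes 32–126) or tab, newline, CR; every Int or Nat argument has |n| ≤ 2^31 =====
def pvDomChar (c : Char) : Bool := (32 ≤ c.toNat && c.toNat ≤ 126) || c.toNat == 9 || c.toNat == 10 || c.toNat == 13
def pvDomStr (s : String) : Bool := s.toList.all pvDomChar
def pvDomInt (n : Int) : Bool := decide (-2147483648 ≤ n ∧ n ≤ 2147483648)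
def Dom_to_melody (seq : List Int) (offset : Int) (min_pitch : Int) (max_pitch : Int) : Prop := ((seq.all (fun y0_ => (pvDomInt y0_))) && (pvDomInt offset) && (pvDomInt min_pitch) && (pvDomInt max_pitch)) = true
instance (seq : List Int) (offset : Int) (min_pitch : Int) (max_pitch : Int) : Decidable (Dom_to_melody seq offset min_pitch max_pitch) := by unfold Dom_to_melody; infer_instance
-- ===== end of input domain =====

-- B replaces the step-by-step ±12 while loops with closed-form ceiling-division arithmetic (faster: O(1) per element instead of looping).

-- ===== PORT A =====
-- `while p - p_ > 7: p -= 12`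
def pvWhileDown (p p_ : Int) : Int :=
  if 7 < p - p_ then pvWhileDown (p - 12) p_ else p
termination_by (p - p_ - 7).toNat
decreasing_by omega

-- `while p - p_ < -6: p += 12`
def pvWhileUp (p p_ : Int) : Int :=
  if p - p_ < -6 then pvWhileUp (p + 12) p_ else p
termination_by (-6 - (p - p_)).toNat
decreasing_by omega

def pvStepA (offset min_pitch max_pitch : Int) (melody : List Int) (x : Int) : List Int :=
  let p := x + offset
  match melody.getLast? with
  | none => melody ++ [p]
  | some p_ =>
      let p1 := pvWhileDown p p_
      let p2 := pvWhileUp p1 p_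
      let p3 := if p2 > max_pitch then p2 - 12 else p2
      let p4 := if p3 < min_pitch then p3 + 12 else p3
      melody ++ [p4]

def to_melody (seq : List Int) (offset : Int) (min_pitch : Int) (max_pitch : Int) : List Int :=
  seq.foldl (pvStepA offset min_pitch max_pitch) []

-- ===== PORT B =====
def pvStepB (offset min_pitch max_pitch : Int) (melody : List Int) (x : Int) : List Int :=
  let p := x + offset
  match melody.getLast? with
  | none => melody ++ [p]
  | some p_ =>
      let d := p - p_
      let d' := if d > 7 then d - 12 * PySem.Int.floordiv (d + 4) 12
                else if d < -6 then d + 12 * PySem.Int.floordiv (5 - d) 12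
                else d
      let q := p_ + d'
      let q1 := if q > max_pitch then q - 12 else q
      let q2 := if q1 < min_pitch then q1 + 12 else q1
      melody ++ [q2]

def to_melody_alt (seq : List Int) (offset : Int) (min_pitch : Int) (max_pitch : Int) : List Int :=
  seq.foldl (pvStepB offset min_pitch max_pitch) []

-- ===== PRECONDITION & SPEC =====
def Spec_to_melody (seq : List Int) (offset : Int) (min_pitch : Int) (max_pitch : Int) (out : List Int) : Prop := out = to_melody_alt seq offset min_pitch max_pitch
instance (seq : List Int) (offset : Int) (min_pitch : Int) (max_pitch : Int) (out : List Int) : Decidable (Spec_to_melody seq offset min_pitch max_pitch out) := by unfold Spec_to_melody; infer_instance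

-- ===== CLAIM (what is proved, stated in full; the proofs are below) =====
def Claim_equal_to_melody : Prop := ∀ (seq : List Int) (offset : Int) (min_pitch : Int) (max_pitch : Int), Dom_to_melody seq offset min_pitch max_pitch → Spec_to_melody seq offset min_pitch max_pitch (to_melody seq offset min_pitch max_pitch)

-- ===== LEMMAS AND PROOFS =====
theorem pvWhileDown_eq (p p_ : Int) :
    pvWhileDown p p_ = if 7 < p - p_ then p - 12 * ((p - p_ + 4) / 12) else p := by
  fun_induction pvWhileDown p p_ with
  | case1 p p_ ih =>
      rw [ih]
      split_ifs <;> omega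
  | case2 p p_ =>
      rw [if_neg (by omega)]

theorem pvWhileUp_eq (p p_ : Int) :
    pvWhileUp p p_ = if p - p_ < -6 then p + 12 * ((5 - (p - p_)) / 12) else p := by
  fun_induction pvWhileUp p p_ with
  | case1 p p_ ih =>
      rw [ih]
      split_ifs <;> omega
  | case2 p p_ =>
      rw [if_neg (by omega)]

-- the two while loops compose to the closed-form shift B computes
theorem pvCore (p p_ : Int) :
    pvWhileUp (pvWhileDown p p_) p_ =
      p_ + (if p - p_ > 7 then p - p_ - 12 * ((p - p_ + 4) / 12)
            else if p - p_ < -6 then p - p_ + 12 * ((5 - (p - p_)) / 12)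
            else p - p_) := by
  rw [pvWhileDown_eq, pvWhileUp_eq]
  split_ifs <;> omega

theorem pvStep_eq (offset min_pitch max_pitch : Int) (melody : List Int) (x : Int) :
    pvStepA offset min_pitch max_pitch melody x = pvStepB offset min_pitch max_pitch melody x := by
  unfold pvStepA pvStepB
  cases h : melody.getLast? with
  | none => rfl
  | some p_ =>
      have hf1 : PySem.Int.floordiv (x + offset - p_ + 4) 12 = (x + offset - p_ + 4) / 12 :=
        PySem.Int.floordiv_eq_ediv_of_pos (by norm_num)
      have hf2 : PySem.Int.floordiv (5 - (x + offset - p_)) 12 = (5 - (x + offset - p_)) / 12 :=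
        PySem.Int.floordiv_eq_ediv_of_pos (by norm_num)
      simp only [pvCore, hf1, hf2]

-- ===== VERDICT (by name: the statement is the Claim_ definition above) =====
theorem to_melody_spec : Claim_equal_to_melody := by
  intro seq offset min_pitch max_pitch _
  unfold Spec_to_melody to_melody to_melody_alt
  have hstep : pvStepA offset min_pitch max_pitch = pvStepB offset min_pitch max_pitch :=
    funext fun m => funext fun x => pvStep_eq offset min_pitch max_pitch m x
  rw [hstep]
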